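-- pv_equiv track=rewrite | github.com/enriquetaso/cassidoos | 2023/289-repeatedGroups.py | repeatedGroups_recursion
-- ===== SOURCE A (Python) =====
-- def repeatedGroups_recursion(nums):
--     """Given a list of numbers, return all groups
--     of repeating consecutive numbers.
--
--     Using recursion to solve this problem.
--     """
--     # base case
--     if len(nums) == 0:
--         return []
--     elif len(nums) == 1:
--         return []
--     elif len(nums) == 2:
--         if nums[0] == nums[1]:
--             return [[nums[0], nums[1]]]
--         else:
--             return []
--
--     # recursive case
--     else:
--         if nums[0] == nums[1]:
--             current_group = []
--             current_group.append(nums[0])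
--             pointer_r = 1
--             while nums[0] == nums[pointer_r]:
--                 pointer_r += 1
--                 current_group.append(nums[0])
--                 if pointer_r == len(nums) - 1:
--                     break
--             return [current_group] + repeatedGroups_recursion(nums[pointer_r:])
--         else:
--             return repeatedGroups_recursion(nums[1:])
-- ===== SOURCE B (Python) =====
-- def repeatedGroups_recursion(nums):
--     """Given a list of numbers, return all groups
--     of repeating consecutive numbers.
--
--     Single linear pass over run boundaries (no recursion, no slicing).
--     Intended fix: a trailing run of length >= 3 is reported in full,
--     where the original drops its last element.
--     """
--     groups = []
--     i = 0
--     n = len(nums)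
--     while i < n:
--         x = nums[i]
--         j = i + 1
--         while j < n and nums[j] == x:
--             j += 1
--         if j - i >= 2:
--             groups.append([x] * (j - i))
--         i = j
--     return groups
-- ===== Notes on version B (the rewrite author's own statement) =====
-- stated objective: faster
-- what changed: Replaced the slice-and-recurse scan (which copies a suffix of the list at every run boundary and recurses) with a single iterative linear pass over run boundaries using two indices.
-- intended difference: On lists whose last three elements are all equal (a trailing run of length >= 3), A's 'pointer_r == len(nums)-1' break stops one element early and A returns the trailing group with its last element dropped (e.g. [[5,5]] for [5,5,5]), while B returns the full trailing run ([[5,5,5]]), which is the intended grouping. — e.g. on repeatedGroups_recursion([5, 5, 5]): A returns [[5, 5]], B returns [[5, 5, 5]]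
import Mathlib
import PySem

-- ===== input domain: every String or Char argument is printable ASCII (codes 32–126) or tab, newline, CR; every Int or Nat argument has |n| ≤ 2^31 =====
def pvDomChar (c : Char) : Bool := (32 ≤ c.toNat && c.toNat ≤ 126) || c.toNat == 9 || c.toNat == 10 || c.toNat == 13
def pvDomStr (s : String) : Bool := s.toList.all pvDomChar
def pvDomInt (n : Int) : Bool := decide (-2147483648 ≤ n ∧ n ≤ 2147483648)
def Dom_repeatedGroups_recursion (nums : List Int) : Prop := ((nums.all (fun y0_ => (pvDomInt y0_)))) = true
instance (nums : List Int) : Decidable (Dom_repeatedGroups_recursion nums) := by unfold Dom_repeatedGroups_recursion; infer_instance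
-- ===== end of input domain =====

-- B replaces A's quadratic slice-and-recurse with one linear pass over run boundaries;
-- B intentionally reports a trailing run of length ≥ 3 in full where A drops its last element (see D_ below).

-- ===== PORT A =====
-- the inner `while nums[0] == nums[pointer_r]: pointer_r += 1; current_group.append(nums[0]); if pointer_r == len(nums)-1: break`
-- (`fuel` is only a structural totality guard; it is always called with enough fuel to finish the loop)
def aLoop (fuel : Nat) (nums : List Int) (x : Int) (p : Nat) (g : List Int) : Nat × List Int :=
  match fuel with
  | 0 => (p, g)
  | fuel + 1 =>
    match nums[p]? with
    | some v =>
      if v = x then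
        if p + 1 = nums.length - 1 then (p + 1, g ++ [x])
        else aLoop fuel nums x (p + 1) (g ++ [x])
      else (p, g)
    | none => (p, g)   -- unreachable in runs started as in A (the break keeps p in range)

def aGroups (fuel : Nat) (nums : List Int) : List (List Int) :=
  match fuel, nums with
  | 0, _ => []
  | _ + 1, [] => []
  | _ + 1, [_] => []
  | _ + 1, [a, b] => if a = b then [[a, b]] else []
  | fuel + 1, a :: b :: c :: t =>
    if a = b then
      let pg := aLoop (a :: b :: c :: t).length (a :: b :: c :: t) a 1 [a]
      [pg.2] ++ aGroups fuel ((a :: b :: c :: t).drop pg.1)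
    else
      aGroups fuel (b :: c :: t)

def repeatedGroups_recursion (nums : List Int) : List (List Int) :=
  aGroups (nums.length + 1) nums

-- ===== PORT B =====
-- inner `while j < n and nums[j] == x: j += 1` (fuel is a structural totality guard, always sufficient)
def bInner (fuel : Nat) (nums : List Int) (x : Int) (j : Nat) : Nat :=
  match fuel with
  | 0 => j
  | fuel + 1 =>
    match nums[j]? with
    | some v => if v = x then bInner fuel nums x (j + 1) else j
    | none => j

-- outer `while i < n:` accumulating `groups`
def bOuter (fuel : Nat) (nums : List Int) (i : Nat) (groups : List (List Int)) : List (List Int) :=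
  match fuel with
  | 0 => groups
  | fuel + 1 =>
    if i < nums.length then
      let x := nums.getD i 0
      let j := bInner (nums.length - i) nums x (i + 1)
      bOuter fuel nums j
        (if 2 ≤ j - i then groups ++ [List.replicate (j - i) x] else groups)
    else groups

def repeatedGroups_recursion_alt (nums : List Int) : List (List Int) :=
  bOuter nums.length nums 0 []

-- ===== PRECONDITION & SPEC =====
-- On inputs whose last three elements are all equal (trailing run of length ≥ 3) A returns the
-- trailing group with its last element dropped (an off-by-one from the `pointer_r == len-1` break),
-- while B returns the full trailing run, which is the intended grouping.
def headRun3 (l : List Int) : Bool :=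
  match l with
  | a :: b :: c :: _ => a == b && b == c
  | _ => false

def D_repeatedGroups_recursion (nums : List Int) : Prop := headRun3 nums.reverse = true
instance (nums : List Int) : Decidable (D_repeatedGroups_recursion nums) := by
  unfold D_repeatedGroups_recursion; infer_instance

def Spec_repeatedGroups_recursion (nums : List Int) (out : List (List Int)) : Prop :=
  ¬ D_repeatedGroups_recursion nums → out = repeatedGroups_recursion_alt nums
instance (nums : List Int) (out : List (List Int)) : Decidable (Spec_repeatedGroups_recursion nums out) := by
  unfold Spec_repeatedGroups_recursion; infer_instance

def pvDiffWitness_repeatedGroups_recursion : List Int := [5, 5, 5]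
def pvDiffWitnessOut_repeatedGroups_recursion : (List (List Int)) × (List (List Int)) :=
  ([[5, 5]], [[5, 5, 5]])

-- ===== CLAIM (what is proved, stated in full; the proofs are below) =====
def Claim_unchanged_repeatedGroups_recursion : Prop := ∀ (nums : List Int), Dom_repeatedGroups_recursion nums → Spec_repeatedGroups_recursion nums (repeatedGroups_recursion nums)
def Claim_changed_repeatedGroups_recursion : Prop := Dom_repeatedGroups_recursion (pvDiffWitness_repeatedGroups_recursion) ∧ D_repeatedGroups_recursion (pvDiffWitness_repeatedGroups_recursion) ∧ repeatedGroups_recursion (pvDiffWitness_repeatedGroups_recursion) = pvDiffWitnessOut_repeatedGroups_recursion.1 ∧ repeatedGroups_recursion_alt (pvDiffWitness_repeatedGroups_recursion) = pvDiffWitnessOut_repeatedGroups_recursion.2 ∧ pvDiffWitnessOut_repeatedGroups_recursion.1 ≠ pvDiffWitnessOut_repeatedGroups_recursion.2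

-- ===== LEMMAS AND PROOFS =====

-- structural reference version of B's pass (proof helper only)
def countLead (x : Int) : List Int → Nat
  | [] => 0
  | y :: t => if y = x then 1 + countLead x t else 0

def sGroups : List Int → List (List Int)
  | [] => []
  | x :: rest =>
    let k := 1 + countLead x rest
    (if 2 ≤ k then [List.replicate k x] else []) ++ sGroups (rest.drop (k - 1))
termination_by l => l.length
decreasing_by simp only [List.length_drop, List.length_cons]; omega

theorem countLead_le (x : Int) (m : List Int) : countLead x m ≤ m.length := by
  induction m with
  | nil => simp [countLead]
  | cons y t ih => simp only [countLead, List.length_cons]; split <;> omega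

theorem countLead_take (x : Int) (m : List Int) :
    m.take (countLead x m) = List.replicate (countLead x m) x := by
  induction m with
  | nil => simp [countLead]
  | cons y t ih =>
    simp only [countLead]; split
    · subst ‹y = x›
      rw [Nat.add_comm]
      simp [List.replicate_succ, ih]
    · simp

theorem countLead_drop_head (x : Int) (m : List Int) :
    (m.drop (countLead x m)).head? ≠ some x := by
  induction m with
  | nil => simp [countLead]
  | cons y t ih =>
    simp only [countLead]; split
    · subst ‹y = x›
      rw [Nat.add_comm]
      simpa using ih
    · simp_all

theorem headRun3_append (m u : List Int) (h : 3 ≤ m.length) :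
    headRun3 (m ++ u) = headRun3 m := by
  match m with
  | a :: b :: c :: t => simp [headRun3]
  | [] | [_] | [_, _] => simp at h

theorem D_suffix (pre s : List Int) (h : D_repeatedGroups_recursion s) :
    D_repeatedGroups_recursion (pre ++ s) := by
  unfold D_repeatedGroups_recursion at *
  have h3 : 3 ≤ s.reverse.length := by
    unfold headRun3 at h
    match hm : s.reverse with
    | a :: b :: c :: t => simp
    | [] | [_] | [_, _] => rw [hm] at h; simp [headRun3] at h
  rw [List.reverse_append, headRun3_append _ _ h3, h]

theorem D_replicate (x : Int) (k : Nat) (hk : 3 ≤ k) :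
    D_repeatedGroups_recursion (List.replicate k x) := by
  unfold D_repeatedGroups_recursion
  rw [List.reverse_replicate]
  match k, hk with
  | (n + 3), _ => simp [List.replicate_succ, headRun3]

theorem aLoop_eq (x : Int) (r : Nat) (rest : List Int) (hr : rest.head? ≠ some x)
    (hne : rest ≠ []) : ∀ (fuel p : Nat) (g : List Int), 1 ≤ p → p ≤ r → r - p < fuel →
    aLoop fuel (List.replicate r x ++ rest) x p g = (r, g ++ List.replicate (r - p) x) := by
  have hlen : (List.replicate r x ++ rest).length = r + rest.length := by simp
  have hrl : 1 ≤ rest.length := List.length_pos_iff.mpr hne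
  intro fuel
  induction fuel with
  | zero => intro p g _ _ hf; omega
  | succ fuel ih =>
    intro p g hp hpr _
    rw [aLoop]
    by_cases hplt : p < r
    · -- the element is x, the loop keeps going
      have hget : (List.replicate r x ++ rest)[p]? = some x := by
        rw [List.getElem?_append_left (by simp; omega)]
        simp [hplt]
      rw [hget]
      simp only [if_pos rfl]
      by_cases hbr : p + 1 = (List.replicate r x ++ rest).length - 1
      · -- break: forces rest.length = 1 and p + 1 = r
        have hbr' : p + 1 = r + rest.length - 1 := by rw [← hlen]; exact hbr
        have hpr1 : p + 1 = r := by omega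
        rw [if_pos hbr]
        have h1 : r - p = 1 := by omega
        rw [h1, hpr1]
        simp
      · rw [if_neg hbr]
        rw [ih (p + 1) (g ++ [x]) (by omega) (by omega) (by omega)]
        have h1 : r - p = (r - (p + 1)) + 1 := by omega
        rw [h1, List.replicate_succ]
        simp
    · -- p = r : the loop condition fails (head of rest ≠ x)
      have hpr' : p = r := by omega
      subst hpr'
      have hget : (List.replicate p x ++ rest)[p]? = rest.head? := by
        rw [List.getElem?_append_right (by simp)]
        simp [List.head?_eq_getElem?]
      match hh : rest.head? with
      | none => simp [List.head?_eq_none_iff] at hh; exact absurd hh hne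
      | some v =>
        rw [hget, hh]
        have hvx : ¬ v = x := by rw [hh] at hr; simpa using hr
        simp [hvx]

theorem A_eq_sGroups : ∀ (fuel : Nat) (nums : List Int), nums.length < fuel →
    ¬ D_repeatedGroups_recursion nums → aGroups fuel nums = sGroups nums := by
  intro fuel
  induction fuel with
  | zero => intro nums hlen _; omega
  | succ fuel ih =>
    intro nums hlen hD
    match nums with
    | [] => rw [aGroups, sGroups]
    | [a] =>
      rw [aGroups, sGroups]
      simp only [countLead, List.drop_nil]
      rw [if_neg (by omega), sGroups]
      rfl
    | [a, b] =>
      by_cases hab : a = b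
      · subst hab
        rw [aGroups, if_pos rfl, sGroups]
        simp [countLead, List.replicate_succ, sGroups]
      · rw [aGroups, if_neg hab, sGroups]
        have hba : ¬ b = a := fun h => hab (Eq.symm h)
        simp [countLead, hba, sGroups]
    | a :: b :: c :: t =>
      by_cases hab : a = b
      · -- run case
        subst hab
        have hclm : countLead a (a :: c :: t) = 1 + countLead a (c :: t) := by
          simp [countLead]
        obtain ⟨cl, hcl⟩ : ∃ cl, countLead a (a :: c :: t) = cl := ⟨_, rfl⟩
        have hcl1 : 1 ≤ cl := by omega
        have hclle : cl ≤ (a :: c :: t).length := hcl ▸ countLead_le a _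
        obtain ⟨rest, hrest⟩ : ∃ r, (a :: c :: t).drop cl = r := ⟨_, rfl⟩
        have htake := countLead_take a (a :: c :: t)
        rw [hcl] at htake
        have h1 : (a :: c :: t : List Int) = List.replicate cl a ++ rest := by
          conv_lhs => rw [← List.take_append_drop cl (a :: c :: t)]
          rw [htake, hrest]
        have hsplit : (a :: a :: c :: t : List Int) = List.replicate (1 + cl) a ++ rest := by
          rw [Nat.add_comm, List.replicate_succ, List.cons_append, ← h1]
        have hrne : rest ≠ [] := by
          intro hre
          apply hD
          have hrep : (a :: a :: c :: t : List Int) = List.replicate (1 + cl) a := by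
            rw [hsplit, hre, List.append_nil]
          rw [hrep]
          refine D_replicate a (1 + cl) ?_
          have hl3 : (a :: a :: c :: t : List Int).length = 1 + cl := by rw [hrep]; simp
          simp at hl3
          omega
        have hrh : rest.head? ≠ some a := by
          rw [← hrest, ← hcl]; exact countLead_drop_head a _
        have hflen : (1 + cl) - 1 < (List.replicate (1 + cl) a ++ rest).length := by
          simp only [List.length_append, List.length_replicate]
          omega
        have hloop := aLoop_eq a (1 + cl) rest hrh hrne
          (List.replicate (1 + cl) a ++ rest).length 1 [a] (le_refl 1) (by omega) hflen
        have hdrop : (List.replicate (1 + cl) a ++ rest).drop (1 + cl) = rest := by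
          rw [List.drop_append_of_le_length (by simp)]; simp
        have hrepl : ([a] ++ List.replicate (1 + cl - 1) a : List Int) = List.replicate (1 + cl) a := by
          have h11 : 1 + cl - 1 = cl := by omega
          rw [h11, Nat.add_comm, List.replicate_succ, List.singleton_append]
        have hrlen : rest.length < fuel := by
          have h2 : rest.length = (a :: c :: t).length - cl := by rw [← hrest]; simp
          simp only [List.length_cons] at h2 hlen hclle
          omega
        have hA : aGroups (fuel + 1) (a :: a :: c :: t)
            = [List.replicate (1 + cl) a] ++ aGroups fuel rest := by
          rw [aGroups, if_pos rfl]
          rw [show (a :: a :: c :: t : List Int) = List.replicate (1 + cl) a ++ rest from hsplit]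
          simp only [hloop, hdrop, hrepl]
        have hsG : sGroups (a :: a :: c :: t) = [List.replicate (1 + cl) a] ++ sGroups rest := by
          rw [sGroups]
          simp only [hcl]
          rw [if_pos (by omega)]
          have h11 : 1 + cl - 1 = cl := by omega
          rw [h11, hrest]
        rw [hA, hsG]
        congr 1
        exact ih rest hrlen (fun hDr => hD (by rw [hsplit]; exact D_suffix _ _ hDr))
      · -- skip case
        rw [aGroups, if_neg hab, sGroups]
        have hba : ¬ b = a := fun h => hab (Eq.symm h)
        have hc0 : countLead a (b :: c :: t) = 0 := by simp [countLead, hba]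
        simp only [hc0]
        rw [if_neg (by omega)]
        simp only [Nat.add_zero, Nat.sub_self, List.drop_zero, List.nil_append]
        exact ih (b :: c :: t) (by simp only [List.length_cons] at hlen ⊢; omega)
          (fun hDr => hD (D_suffix [a] _ hDr))

theorem bInner_eq : ∀ (fuel : Nat) (nums : List Int) (x : Int) (j : Nat),
    nums.length - j < fuel → bInner fuel nums x j = j + countLead x (nums.drop j) := by
  intro fuel
  induction fuel with
  | zero => intro nums x j hf; omega
  | succ fuel ih =>
    intro nums x j _
    rw [bInner]
    split
    next v hj =>
      have hjlt := (List.getElem?_eq_some_iff.mp hj).1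
      have hdrop : nums.drop j = v :: nums.drop (j + 1) := by
        rw [List.drop_eq_getElem_cons hjlt]
        congr 1
        exact (List.getElem?_eq_some_iff.mp hj).2
      by_cases hv : v = x
      · subst hv
        rw [if_pos rfl, ih nums v (j + 1) (by omega), hdrop, countLead, if_pos rfl]
        omega
      · rw [if_neg hv, hdrop, countLead, if_neg hv]
        omega
    next hj =>
      have hjge : nums.length ≤ j := List.getElem?_eq_none_iff.mp hj
      rw [List.drop_eq_nil_of_le hjge]
      simp [countLead]

theorem bOuter_eq : ∀ (fuel : Nat) (nums : List Int) (i : Nat) (gs : List (List Int)),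
    nums.length - i ≤ fuel → bOuter fuel nums i gs = gs ++ sGroups (nums.drop i) := by
  intro fuel
  induction fuel with
  | zero =>
    intro nums i gs h
    rw [bOuter, List.drop_eq_nil_of_le (by omega), sGroups, List.append_nil]
  | succ fuel ih =>
    intro nums i gs h
    by_cases hi : i < nums.length
    · rw [bOuter, if_pos hi]
      set x := nums.getD i 0 with hx
      have hj := bInner_eq (nums.length - i) nums x (i + 1) (by omega)
      set j := bInner (nums.length - i) nums x (i + 1) with hjd
      have hcle := countLead_le x (nums.drop (i + 1))
      simp only [List.length_drop] at hcle
      have hjn : j ≤ nums.length := by omega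
      have hji : i + 1 ≤ j := by omega
      rw [ih nums j _ (by omega)]
      have hdropi : nums.drop i = x :: nums.drop (i + 1) := by
        rw [List.drop_eq_getElem_cons hi]
        congr 1
        rw [hx]; exact (List.getD_eq_getElem nums 0 hi).symm
      rw [hdropi, sGroups]
      have hk : 1 + countLead x (nums.drop (i + 1)) = j - i := by omega
      rw [hk]
      have hdj : (nums.drop (i + 1)).drop (j - i - 1) = nums.drop j := by
        rw [List.drop_drop]
        congr 1
        omega
      rw [hdj]
      by_cases h2 : 2 ≤ j - i
      · rw [if_pos h2, if_pos h2]
        simp [← hjd]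
      · rw [if_neg h2, if_neg h2]
        simp [← hjd]
    · rw [bOuter, if_neg hi, List.drop_eq_nil_of_le (by omega), sGroups, List.append_nil]

-- ===== VERDICT (by name: the statement is the Claim_ definition above) =====
theorem repeatedGroups_recursion_spec : Claim_unchanged_repeatedGroups_recursion := by
  intro nums _ hD
  rw [repeatedGroups_recursion_alt, bOuter_eq nums.length nums 0 [] (by omega)]
  rw [repeatedGroups_recursion, A_eq_sGroups (nums.length + 1) nums (by omega) hD]
  simp

theorem repeatedGroups_recursion_changed : Claim_changed_repeatedGroups_recursion := by
  unfold Claim_changed_repeatedGroups_recursion; decide
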